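-- pv_equiv track=rewrite | github.com/strobi-bunni/MyPythonPractice | problem_solving/sudoku.py | narrow
-- ===== SOURCE A (Python) =====
-- from itertools import compress, zip_longest
--
-- def find_matching_tile(i: int) -> list[int]:
--     """해당 칸에 매칭되는 블록들을 1로 표시한다.
--
--     - 같은 가로줄에 있거나
--     - 같은 세로줄에 있거나
--     - 혹은 같은 3x3 블록에 있거나
--     """
--     return [int((p % 9 == i % 9) | (p // 9 == i // 9) | ((p % 9 // 3 == i % 9 // 3) & (p // 27 == i // 27)))
--             for p in range(81)]
--
-- def get_candidate_map2(board: list[int]) -> list[set[int]]: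
--     """각 칸에 올 수 있는 후보 숫자를 선정한다.
--
--     get_candidate_map과 별 차이는 없는 듯 하다.
--     """
--     candidates = [set(range(1, 10)) for _ in range(81)]
--     for (index_board, value_board) in enumerate(board):
--         if value_board:
--             # 만약 해당 칸에 숫자가 있다면 같은 가로줄, 세로줄, 블록의 해당 후보 숫자들을 지운다.
--             matching_tiles = find_matching_tile(index_board)
--             for (index_matching, value_matching) in enumerate(matching_tiles):
--                 if value_matching and index_matching != index_board:
--                     candidates[index_matching] -= {board[index_board]}
--             # 해당 칸에 숫자가 있다면 해당 칸은 더 이상 숫자가 들어갈 수 없기 때문에 비운다.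
--             candidates[index_board].clear()
--         else:
--             # 만약 해당 칸에 숫자가 없다면 같은 가로줄, 세로줄, 블록을 스캔해서 후보 숫자들을 지운다.
--             candidates[index_board] -= set(compress(board, find_matching_tile(index_board)))
--     return candidates
--
-- def narrow(board: list[int]) -> list[int]:
--     """백트래킹 방법을 사용하기 전, 채울 수 있는 칸은 모두 채운다.
--     """
--     board_copy = board.copy()
--
--     while True:
--         old_board = board_copy.copy()
--         candidates = get_candidate_map2(board_copy)
--         for (i, v) in enumerate(candidates):
--             # 만약에 하나만 올 수 있다면 그것을 채워 넣는다(Sole candidate)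
--             if len(v) == 1:
--                 board_copy[i] = v.pop()
--         # 더 이상 채워 넣을 수 없다면 루프를 빠져나간다.
--         if old_board == board_copy:
--             break
--     return board_copy
-- ===== SOURCE B (Python) =====
-- def _pass(b):
--     n = len(b)
--     rows = [set() for _ in range(9)]
--     cols = [set() for _ in range(9)]
--     boxes = [set() for _ in range(9)]
--     for i in range(n):
--         v = b[i]
--         if v:
--             rows[i // 9].add(v)
--             cols[i % 9].add(v)
--             boxes[i // 9 // 3 * 3 + i % 9 // 3].add(v)
--
--     def fill(i):
--         cand = set(range(1, 10)) - rows[i // 9] - cols[i % 9] - boxes[i // 9 // 3 * 3 + i % 9 // 3]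
--         return cand.pop() if len(cand) == 1 else 0
--
--     return [b[i] or fill(i) for i in range(n)]
--
-- def narrow(board):
--     # each pass that changes anything fills at least one empty cell, so
--     # len(board) + 1 passes always reach (and then preserve) the fixpoint
--     b = list(board)
--     for _ in range(len(board) + 1):
--         b = _pass(b)
--     return b
-- ===== Notes on version B (the rewrite author's own statement) =====
-- stated objective: alternative
-- what changed: Replaced A's while-until-unchanged fixpoint with early exit and per-cell 81-entry peer-mask candidate maps by a bounded len(board)+1 for-loop of passes (each changing pass fills an empty cell, so that bound provably reaches and preserves the fixpoint, no before/after comparison) where each pass builds 27 shared row/column/box used-digit sets in one scan and fills from them.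
-- outside the precondition, e.g. on narrow([1, 2, 3, 4, 5, 6, 7, 8]): A raises IndexError, B returns [1, 2, 3, 4, 5, 6, 7, 8]
import Mathlib
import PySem

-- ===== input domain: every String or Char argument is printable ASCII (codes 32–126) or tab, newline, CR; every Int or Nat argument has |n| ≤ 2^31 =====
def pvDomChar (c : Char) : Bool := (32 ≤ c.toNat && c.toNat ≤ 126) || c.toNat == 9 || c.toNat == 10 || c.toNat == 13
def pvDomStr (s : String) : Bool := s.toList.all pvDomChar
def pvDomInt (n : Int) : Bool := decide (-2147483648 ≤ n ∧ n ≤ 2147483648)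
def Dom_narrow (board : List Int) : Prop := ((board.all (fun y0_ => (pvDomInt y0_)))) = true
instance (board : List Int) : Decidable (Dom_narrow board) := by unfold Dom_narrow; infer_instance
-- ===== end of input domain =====

-- B replaces A's while-until-unchanged loop and per-cell 81-entry peer masks by a bounded
-- len(board)+1 for-loop of passes, each pass building 27 shared row/column/box used-digit sets
-- in one scan of the board (alternative decomposition; not claimed faster).

-- ===== PORT A =====
-- the boolean peer condition of find_matching_tile (same row, column or 3x3 block)
def matchB (i p : Int) : Bool :=
  (PySem.Int.mod p 9 == PySem.Int.mod i 9) ||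
  (PySem.Int.floordiv p 9 == PySem.Int.floordiv i 9) ||
  ((PySem.Int.floordiv (PySem.Int.mod p 9) 3 == PySem.Int.floordiv (PySem.Int.mod i 9) 3) &&
   (PySem.Int.floordiv p 27 == PySem.Int.floordiv i 27))

def findMatchingTile (i : Int) : List Int :=
  (PySem.List.pyRange 0 81 1).map (fun p => if matchB i p then (1 : Int) else 0)

-- itertools.compress(board, mask): the board values whose mask entry is truthy (exact: stops at the shorter list)
def compressI (xs ms : List Int) : List Int :=
  ((xs.zip ms).filter (fun q => q.2 != 0)).map (fun q => q.1)

def gcm2 (board : List Int) : List (PySem.Set Int) :=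
  let candidates : List (PySem.Set Int) :=
    (PySem.List.pyRange 0 81 1).map (fun _ => PySem.Set.ofList (PySem.List.pyRange 1 10 1))
  (PySem.List.enumerate board 0).foldl (fun cand iv =>
    if iv.2 != 0 then
      -- board[index_board] = iv.2 (board is not mutated inside this loop) — exact
      let cand := (PySem.List.enumerate (findMatchingTile iv.1) 0).foldl (fun c jm =>
        if jm.2 != 0 && jm.1 != iv.1 then
          PySem.List.pySetD c jm.1 (PySem.Set.diff (PySem.List.pyGetD c jm.1 PySem.Set.empty) [iv.2])
        else c) cand
      PySem.List.pySetD cand iv.1 PySem.Set.empty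
    else
      PySem.List.pySetD cand iv.1
        (PySem.Set.diff (PySem.List.pyGetD cand iv.1 PySem.Set.empty)
          (compressI board (findMatchingTile iv.1)))) candidates

-- while True: fuel 82 is exact on the length-81 boards admitted by Pre_: a pass that changes the
-- board turns at least one of the ≤ 81 zero cells nonzero, and once a pass leaves the board
-- unchanged every later pass does too, so Python performs at most 82 iterations.
-- v.pop() on the singleton candidate set is its unique element (headD) — exact under the len == 1 guard.
def narrowLoop : Nat → List Int → List Int
  | 0, b => b
  | fuel + 1, b =>
    let candidates := gcm2 b
    let b' := (PySem.List.enumerate candidates 0).foldl (fun bb iv =>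
      if PySem.Set.len iv.2 == 1 then PySem.List.pySetD bb iv.1 (iv.2.headD 0) else bb) b
    if b == b' then b' else narrowLoop fuel b'

def narrow (board : List Int) : List Int := narrowLoop 82 board

-- Nat form of the peer condition (used by the proofs and by Pre_'s geometric clause)
def matchN (k j : Nat) : Bool :=
  (j % 9 == k % 9) || (j / 9 == k / 9) || (j % 9 / 3 == k % 9 / 3 && j / 27 == k / 27)

-- ===== PORT B =====
-- box index i//9//3*3 + i%9//3
def bxI (i : Int) : Int :=
  PySem.Int.floordiv (PySem.Int.floordiv i 9) 3 * 3 + PySem.Int.floordiv (PySem.Int.mod i 9) 3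

-- body of _pass's build loop: one step over the (rows, cols, boxes) triple
def buildStep (b : List Int)
    (s : List (PySem.Set Int) × List (PySem.Set Int) × List (PySem.Set Int)) (i : Int) :
    List (PySem.Set Int) × List (PySem.Set Int) × List (PySem.Set Int) :=
  let v := PySem.List.pyGetD b i 0
  if v != 0 then
    (PySem.List.pySetD s.1 (PySem.Int.floordiv i 9)
       (PySem.Set.add (PySem.List.pyGetD s.1 (PySem.Int.floordiv i 9) PySem.Set.empty) v),
     PySem.List.pySetD s.2.1 (PySem.Int.mod i 9)
       (PySem.Set.add (PySem.List.pyGetD s.2.1 (PySem.Int.mod i 9) PySem.Set.empty) v),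
     PySem.List.pySetD s.2.2 (bxI i)
       (PySem.Set.add (PySem.List.pyGetD s.2.2 (bxI i) PySem.Set.empty) v))
  else s

-- _pass(b): build the 27 used-digit sets, then `[b[i] or fill(i) for i in range(n)]`.
-- cand.pop() on the singleton set is its unique element (headD) — exact under the len == 1 guard.
def passAlt (b : List Int) : List Int :=
  let n := PySem.List.len b
  let rows0 : List (PySem.Set Int) := (PySem.List.pyRange 0 9 1).map (fun _ => PySem.Set.empty)
  let cols0 : List (PySem.Set Int) := (PySem.List.pyRange 0 9 1).map (fun _ => PySem.Set.empty)
  let boxes0 : List (PySem.Set Int) := (PySem.List.pyRange 0 9 1).map (fun _ => PySem.Set.empty)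
  let s := (PySem.List.pyRange 0 n 1).foldl (buildStep b) (rows0, cols0, boxes0)
  (PySem.List.pyRange 0 n 1).map (fun i =>
    let v := PySem.List.pyGetD b i 0
    if v != 0 then v
    else
      let cand := PySem.Set.diff (PySem.Set.diff (PySem.Set.diff
        (PySem.Set.ofList (PySem.List.pyRange 1 10 1))
        (PySem.List.pyGetD s.1 (PySem.Int.floordiv i 9) PySem.Set.empty))
        (PySem.List.pyGetD s.2.1 (PySem.Int.mod i 9) PySem.Set.empty))
        (PySem.List.pyGetD s.2.2 (bxI i) PySem.Set.empty)
      if PySem.Set.len cand == 1 then cand.headD 0 else 0)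

-- for _ in range(len(board) + 1): b = _pass(b)
def narrow_alt (board : List Int) : List Int :=
  (PySem.List.pyRange 0 (PySem.List.len board + 1) 1).foldl (fun b _ => passAlt b) board

-- ===== PRECONDITION & SPEC =====
-- A hard-codes an 81-cell candidate table: it raises IndexError on every board longer than 81 and
-- on any shorter board on which a cell at an index beyond the board's length ever acquires a sole
-- candidate.  Pre_ excludes those inputs by two sound closed-form clauses: either every
-- out-of-range cell has fewer than 8 in-range peers (so its candidate set always keeps >= 2
-- digits), or the board holds fewer than 8 distinct digits 1..9 (so no cell anywhere is ever
-- forced); B computes the same fixpoint touching only in-range cells.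
def Pre_narrow (board : List Int) : Prop :=
  board.length ≤ 81 ∧
  ((∀ k, k < 81 → board.length ≤ k →
      ((List.range board.length).filter (fun j => matchN j k)).length < 8) ∨
   ((PySem.List.pyRange 1 10 1).filter (fun v => board.contains v)).length < 8)
instance (board : List Int) : Decidable (Pre_narrow board) := by unfold Pre_narrow; infer_instance

def pvWitness_narrow : List Int := List.replicate 81 0

def Spec_narrow (board : List Int) (out : List Int) : Prop := out = narrow_alt board
instance (board : List Int) (out : List Int) : Decidable (Spec_narrow board out) := by unfold Spec_narrow; infer_instance

-- ===== CLAIM (what is proved, stated in full; the proofs are below) =====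
def Claim_equal_narrow : Prop := ∀ (board : List Int), Dom_narrow board → Pre_narrow board → Spec_narrow board (narrow board)

-- ===== LEMMAS AND PROOFS =====

-- proof-side bridge: the peer list / forced value / single pass in row-col-box form
def peersB (i : Int) : List Int :=
  let r := PySem.Int.floordiv i 9
  let c := PySem.Int.mod i 9
  let br := r - PySem.Int.mod r 3
  let bc := c - PySem.Int.mod c 3
  ((PySem.List.pyRange 0 9 1).map (fun k => 9 * r + k)) ++
  ((PySem.List.pyRange 0 9 1).map (fun k => 9 * k + c)) ++
  ((PySem.List.pyRange 0 9 1).map (fun k => 9 * (br + PySem.Int.floordiv k 3) + (bc + PySem.Int.mod k 3)))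

def forcedB (b : List Int) (i : Int) : Int :=
  let used : PySem.Set Int := PySem.Set.ofList
    (((peersB i).filter (fun p => decide (p < PySem.List.len b))).map (fun p => PySem.List.pyGetD b p 0))
  let cand := (PySem.List.pyRange 1 10 1).filter (fun v => !(PySem.Set.contains used v))
  if cand.length == 1 then PySem.List.pyGetD cand 0 0 else 0

def passB (b : List Int) : List Int :=
  (PySem.List.pyRange 0 (PySem.List.len b) 1).map (fun i =>
    if PySem.List.pyGetD b i 0 != 0 then PySem.List.pyGetD b i 0 else forcedB b i)

def peersN (k : Nat) : List Nat :=
  let r := k / 9; let c := k % 9; let br := r - r % 3; let bc := c - c % 3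
  ((List.range 9).map (fun t => 9 * r + t)) ++ ((List.range 9).map (fun t => 9 * t + c)) ++
  ((List.range 9).map (fun t => 9 * (br + t / 3) + (bc + t % 3)))

lemma matchB_natCast (k j : Nat) : matchB (k : Int) (j : Int) = matchN k j := by
  rw [Bool.eq_iff_iff]
  simp [matchB, matchN, PySem.Int.mod_eq_emod_of_pos, PySem.Int.floordiv_eq_ediv_of_pos]
  omega

lemma matchN_symm (k j : Nat) : matchN k j = matchN j k := by
  simp [matchN, Bool.beq_comm]

lemma mem_peersN_iff (k j : Nat) (hk : k < 81) (hj : j < 81) :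
    j ∈ peersN k ↔ matchN k j = true := by
  simp only [peersN, List.mem_append, List.mem_map, List.mem_range, matchN,
    Bool.or_eq_true, Bool.and_eq_true, beq_iff_eq]
  constructor
  · rintro ((⟨t, ht, rfl⟩ | ⟨t, ht, rfl⟩) | ⟨t, ht, rfl⟩)
    · omega
    · omega
    · have hb1 : k / 9 - k / 9 % 3 = 3 * (k / 27) := by omega
      have hb2 : k % 9 - k % 9 % 3 = 3 * (k % 9 / 3) := by omega
      rw [hb1, hb2]
      refine Or.inr ⟨?_, ?_⟩ <;> omega
  · rintro ((h | h) | ⟨h1, h2⟩)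
    · exact Or.inl (Or.inr ⟨j / 9, by omega, by omega⟩)
    · exact Or.inl (Or.inl ⟨j % 9, by omega, by omega⟩)
    · exact Or.inr
        ⟨(j / 9 - (k / 9 - k / 9 % 3)) * 3 + (j % 9 - (k % 9 - k % 9 % 3)), by omega, by omega⟩

lemma peers_lt : ∀ k < 81, ∀ p ∈ peersN k, p < 81 := by
  intro k hk p hp
  simp only [peersN, List.mem_append, List.mem_map, List.mem_range] at hp
  rcases hp with ((⟨t, ht, rfl⟩ | ⟨t, ht, rfl⟩) | ⟨t, ht, rfl⟩) <;> omega

lemma set_diff_eq_filter (s t : List Int) :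
    PySem.Set.diff s t = s.filter (fun x => !(PySem.Set.contains t x)) := by
  simp [PySem.Set.diff]

lemma peersB_natCast (k : Nat) : peersB (k : Int) = (peersN k).map Int.ofNat := by
  simp only [peersB, peersN, PySem.List.pyRange_one, List.map_append, List.map_map]
  congr 1
  · congr 1 <;>
    · apply List.map_congr_left; intro t ht
      simp [PySem.Int.mod_eq_emod_of_pos, PySem.Int.floordiv_eq_ediv_of_pos, Int.ofNat_eq_natCast, Function.comp]
      try (push_cast; omega)
  · apply List.map_congr_left; intro t ht
    simp [PySem.Int.mod_eq_emod_of_pos, PySem.Int.floordiv_eq_ediv_of_pos, Int.ofNat_eq_natCast, Function.comp]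
    push_cast
    omega

lemma foldl_enum_setD_length {α β : Type} (d : α) (Q : Int → β → Bool) (f : Int → β → α → α) :
    ∀ (vs : List β) (s : Int) (c : List α),
      ((PySem.List.enumerate vs s).foldl
        (fun c iv => if Q iv.1 iv.2 then
            PySem.List.pySetD c iv.1 (f iv.1 iv.2 (PySem.List.pyGetD c iv.1 d)) else c) c).length
      = c.length := by
  intro vs
  induction vs with
  | nil => intro s c; simp [PySem.List.enumerate_nil]
  | cons v vs ih =>
    intro s c
    rw [PySem.List.enumerate_cons, List.foldl_cons, ih]
    split
    · exact PySem.List.length_pySetD ..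
    · rfl

lemma pySetD_out_of_range {α : Type} (c : List α) (s : Nat) (v : α) (hs : ¬ s < c.length) :
    PySem.List.pySetD c (s : Nat) v = c := by
  have hnone : PySem.List.pySet? c (s : Nat) v = none := by
    rw [PySem.List.pySet?_eq_none_iff]
    simp [PySem.Raise.InRange]
    omega
  simp [PySem.List.pySetD, hnone]

lemma foldl_enum_setD_get {α β : Type} (d : α) (e : β) (Q : Int → β → Bool) (f : Int → β → α → α) :
    ∀ (vs : List β) (s : Nat) (c : List α),
    ∀ (k : Nat), k < c.length →
      PySem.List.pyGetD ((PySem.List.enumerate vs (s : Int)).foldl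
        (fun c iv => if Q iv.1 iv.2 then
            PySem.List.pySetD c iv.1 (f iv.1 iv.2 (PySem.List.pyGetD c iv.1 d)) else c) c) (k : Int) d
      = if s ≤ k ∧ k - s < vs.length ∧ Q (k : Int) (vs.getD (k - s) e) then
          f (k : Int) (vs.getD (k - s) e) (PySem.List.pyGetD c (k : Int) d)
        else PySem.List.pyGetD c (k : Int) d := by
  intro vs
  induction vs with
  | nil =>
    intro s c k hk
    simp [PySem.List.enumerate_nil]
  | cons v vs ih =>
    intro s c k hk
    rw [PySem.List.enumerate_cons, List.foldl_cons]
    have hs1 : ((s : Int) + 1) = ((s + 1 : Nat) : Int) := by push_cast; ring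
    set c1 := (if Q (s : Int) v then
        PySem.List.pySetD c (s : Int) (f (s : Int) v (PySem.List.pyGetD c (s : Int) d)) else c) with hc1
    have hlc1 : c1.length = c.length := by
      rw [hc1]; split
      · exact PySem.List.length_pySetD ..
      · rfl
    have hget1 : PySem.List.pyGetD c1 (k : Int) d =
        if k = s ∧ Q (s : Int) v then f (s : Int) v (PySem.List.pyGetD c (k : Int) d)
        else PySem.List.pyGetD c (k : Int) d := by
      rw [hc1]
      by_cases hq : Q (s : Int) v
      · rw [if_pos hq]
        by_cases hslt : s < c.length
        · rw [PySem.List.pyGetD_pySetD_natCast _ _ _ _ _ hslt]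
          by_cases hks : k = s
          · simp [hks, hq]
          · have hki : (k : Int) ≠ (s : Int) := by exact_mod_cast hks
            simp [hks]
        · rw [pySetD_out_of_range c s _ hslt]
          have hks : ¬ k = s := by omega
          simp [hks]
      · simp [hq]
    rw [hs1, ih (s + 1) c1 k (by omega), hget1]
    by_cases hks : k = s
    · have hki : (k : Int) = (s : Int) := by exact_mod_cast hks
      have h1 : ¬ (s + 1 ≤ k) := by omega
      rw [if_neg (show ¬(s + 1 ≤ k ∧ k - (s + 1) < vs.length ∧ Q (↑k) (vs.getD (k - (s + 1)) e) = true)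
            from fun hc => absurd hc.1 h1)]
      have hgd0 : (v :: vs).getD (k - s) e = v := by rw [show k - s = 0 by omega]; rfl
      simp only [hgd0, List.length_cons, hki]
      exact if_congr (by
        constructor
        · rintro ⟨_, hq⟩; exact ⟨by omega, by omega, hq⟩
        · rintro ⟨_, _, hq⟩; exact ⟨hks, hq⟩) rfl rfl
    · rw [if_neg (show ¬(k = s ∧ Q (↑s) v = true) from fun hc => hks hc.1)]
      by_cases hle : s + 1 ≤ k
      · have hgd : (v :: vs).getD (k - s) e = vs.getD (k - (s + 1)) e := by
          rw [show k - s = (k - (s + 1)) + 1 by omega]; rfl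
        simp only [hgd, List.length_cons]
        exact if_congr (by
          constructor
          · rintro ⟨h1', h2', h3'⟩; exact ⟨by omega, by omega, h3'⟩
          · rintro ⟨h1', h2', h3'⟩; exact ⟨by omega, by omega, h3'⟩) rfl rfl
      · have h1 : ¬ (s ≤ k) := by omega
        simp [hle, h1]

def baseCand : List Int := PySem.List.pyRange 1 10 1

def remB (b : List Int) (m k : Nat) (v : Int) : Bool :=
  ((List.range m).any (fun j =>
      b.getD j 0 != 0 && matchN j k && (decide (k ≠ j)) && (b.getD j 0 == v))) ||
  (decide (k < m) && (b.getD k 0 == 0) && (compressI b (findMatchingTile (k : Int))).contains v)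

def stepA (board : List Int) (cand : List (PySem.Set Int)) (iv : Int × Int) : List (PySem.Set Int) :=
  if iv.2 != 0 then
    let cand := (PySem.List.enumerate (findMatchingTile iv.1) 0).foldl (fun c jm =>
      if jm.2 != 0 && jm.1 != iv.1 then
        PySem.List.pySetD c jm.1 (PySem.Set.diff (PySem.List.pyGetD c jm.1 PySem.Set.empty) [iv.2])
      else c) cand
    PySem.List.pySetD cand iv.1 PySem.Set.empty
  else
    PySem.List.pySetD cand iv.1
      (PySem.Set.diff (PySem.List.pyGetD cand iv.1 PySem.Set.empty)
        (compressI board (findMatchingTile iv.1)))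

def initC : List (PySem.Set Int) :=
  (PySem.List.pyRange 0 81 1).map (fun _ => PySem.Set.ofList (PySem.List.pyRange 1 10 1))

lemma gcm2_eq (b : List Int) : gcm2 b = (PySem.List.enumerate b 0).foldl (stepA b) initC := rfl

lemma length_findMatchingTile (i : Int) : (findMatchingTile i).length = 81 := by
  simp [findMatchingTile, PySem.List.length_pyRange_one]

lemma ftm_getD (i : Int) (k : Nat) (hk : k < 81) :
    (findMatchingTile i).getD k 0 = if matchB i (k : Int) then (1 : Int) else 0 := by
  rw [← PySem.List.pyGetD_natCast]
  unfold findMatchingTile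
  rw [PySem.List.pyGetD_map_pyRange_of_nonneg _ 81 (k : Int) 0 (by positivity) (by exact_mod_cast hk)]

-- pointwise action of the inner (mask) fold of stepA
lemma stepA_inner_get (b : List Int) (c : List (PySem.Set Int)) (hc : c.length = 81)
    (m : Nat) (hm : m < 81) (v : Int) (k : Nat) (hk : k < 81) :
    PySem.List.pyGetD ((PySem.List.enumerate (findMatchingTile (m : Int)) 0).foldl (fun c jm =>
      if jm.2 != 0 && jm.1 != (m : Int) then
        PySem.List.pySetD c jm.1 (PySem.Set.diff (PySem.List.pyGetD c jm.1 PySem.Set.empty) [v])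
      else c) c) (k : Int) PySem.Set.empty
    = if matchN m k ∧ k ≠ m then PySem.Set.diff (PySem.List.pyGetD c (k : Int) PySem.Set.empty) [v]
      else PySem.List.pyGetD c (k : Int) PySem.Set.empty := by
  have h := foldl_enum_setD_get (α := PySem.Set Int) (β := Int) PySem.Set.empty 0
    (fun j mv => mv != 0 && j != (m : Int)) (fun _ _ cell => PySem.Set.diff cell [v])
    (findMatchingTile (m : Int)) 0 c k (by omega)
  rw [show ((0 : Nat) : Int) = (0 : Int) from rfl] at h
  rw [h]
  rw [Nat.sub_zero, ftm_getD _ k hk, matchB_natCast]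
  by_cases hmk : matchN m k <;> by_cases hkm : k = m
  · subst hkm
    simp [hmk]
  · have : (k : Int) ≠ (m : Int) := by exact_mod_cast hkm
    simp [hmk, hkm, this, length_findMatchingTile, hk]
  · subst hkm
    simp [hmk]
  · simp [hmk, hkm, length_findMatchingTile, hk]

lemma length_foldl_stepA_inner (i v : Int) (c : List (PySem.Set Int)) :
    ((PySem.List.enumerate (findMatchingTile i) 0).foldl (fun c jm =>
      if jm.2 != 0 && jm.1 != i then
        PySem.List.pySetD c jm.1 (PySem.Set.diff (PySem.List.pyGetD c jm.1 PySem.Set.empty) [v])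
      else c) c).length = c.length :=
  foldl_enum_setD_length (α := PySem.Set Int) (β := Int) PySem.Set.empty
    (fun j mv => mv != 0 && j != i) (fun _ _ cell => PySem.Set.diff cell [v])
    (findMatchingTile i) 0 c

lemma length_stepA (b : List Int) (c : List (PySem.Set Int)) (iv : Int × Int) :
    (stepA b c iv).length = c.length := by
  unfold stepA
  split
  · rw [PySem.List.length_pySetD, length_foldl_stepA_inner]
  · rw [PySem.List.length_pySetD]

-- pointwise action of one outer step on cell k, for a processed index m < 81
lemma stepA_get (b : List Int) (c : List (PySem.Set Int)) (hc : c.length = 81)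
    (m : Nat) (hm : m < 81) (v : Int) (k : Nat) (hk : k < 81) :
    PySem.List.pyGetD (stepA b c ((m : Int), v)) (k : Int) PySem.Set.empty
    = if v ≠ 0 then
        (if k = m then PySem.Set.empty
         else if matchN m k then PySem.Set.diff (PySem.List.pyGetD c (k : Int) PySem.Set.empty) [v]
         else PySem.List.pyGetD c (k : Int) PySem.Set.empty)
      else
        (if k = m then
           PySem.Set.diff (PySem.List.pyGetD c (k : Int) PySem.Set.empty)
             (compressI b (findMatchingTile (m : Int)))
         else PySem.List.pyGetD c (k : Int) PySem.Set.empty) := by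
  unfold stepA
  by_cases hv : v ≠ 0
  · simp only [hv, bne_iff_ne, ne_eq, not_false_eq_true, if_true]
    have hlen : ((PySem.List.enumerate (findMatchingTile (m : Int)) 0).foldl (fun c jm =>
        if jm.2 != 0 && jm.1 != (m : Int) then
          PySem.List.pySetD c jm.1 (PySem.Set.diff (PySem.List.pyGetD c jm.1 PySem.Set.empty) [v])
        else c) c).length = c.length := length_foldl_stepA_inner _ v c
    rw [PySem.List.pyGetD_pySetD_natCast _ m k _ _ (by rw [hlen, hc]; exact hm)]
    by_cases hkm : k = m
    · simp [hkm]
    · rw [if_neg hkm, if_neg hkm, stepA_inner_get b c hc m hm v k hk]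
      by_cases hmk : matchN m k
      · rw [if_pos ⟨hmk, hkm⟩, if_pos hmk]
      · rw [if_neg (fun h => hmk h.1), if_neg hmk]
  · push_neg at hv
    subst hv
    simp only [if_neg (show ¬((0:Int) ≠ 0) from fun h => h rfl)]
    rw [if_neg (show ¬(((0:Int) != 0) = true) by simp)]
    rw [PySem.List.pyGetD_pySetD_natCast _ m k _ _ (by rw [hc]; exact hm)]
    by_cases hkm : k = m
    · simp [hkm]
    · simp [hkm]

lemma initC_get (k : Nat) (hk : k < 81) :
    PySem.List.pyGetD initC (k : Int) PySem.Set.empty = baseCand := by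
  unfold initC baseCand
  rw [PySem.List.pyGetD_map_pyRange_of_nonneg _ 81 (k : Int) _ (by positivity) (by exact_mod_cast hk)]
  exact PySem.Set.ofList_eq_self_of_nodup _ (PySem.List.nodup_pyRange_one 1 10)

lemma length_initC : initC.length = 81 := by
  simp [initC, PySem.List.length_pyRange_one]

-- A's candidate state after processing the first m board entries
def icand (b : List Int) (m k : Nat) : PySem.Set Int :=
  if m ≤ k then baseCand.filter (fun v => !(remB b m k v))
  else if b.getD k 0 ≠ 0 then []
  else baseCand.filter (fun v => !(remB b m k v))


lemma diff_filter (p : Int → Bool) (t l : List Int) :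
    PySem.Set.diff (l.filter p) t = l.filter (fun v => p v && !(PySem.Set.contains t v)) := by
  rw [set_diff_eq_filter, List.filter_filter]
  apply List.filter_congr
  intro v _
  rw [Bool.and_comm]

lemma remB_succ (b : List Int) (m k : Nat) (v : Int) :
    remB b (m + 1) k v =
      (remB b m k v ||
       (b.getD m 0 != 0 && matchN m k && !(decide (k = m)) && (b.getD m 0 == v)) ||
       (decide (k = m) && (b.getD k 0 == 0) && (compressI b (findMatchingTile (k : Int))).contains v)) := by
  unfold remB
  rw [List.range_succ, List.any_append, Bool.eq_iff_iff]
  have hlt : (decide (k < m + 1)) = (decide (k < m) || decide (k = m)) := by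
    by_cases h1 : k < m <;> by_cases h2 : k = m <;> simp [h1, h2] <;> omega
  simp only [hlt, List.any_cons, List.any_nil, Bool.or_false]
  by_cases hkm : k = m <;> simp [hkm] <;>
    try (constructor <;> rintro ((h | h) | h) <;>
      first | exact Or.inl (Or.inl h) | exact Or.inr h | exact Or.inl (Or.inr h))

lemma icand_alt (b : List Int) (m k : Nat) :
    icand b m k = if k < m ∧ b.getD k 0 ≠ 0 then ([] : PySem.Set Int)
      else baseCand.filter (fun v => !(remB b m k v)) := by
  unfold icand
  by_cases h1 : m ≤ k
  · rw [if_pos h1, if_neg (by omega)]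
  · rw [if_neg h1]
    by_cases h2 : b.getD k 0 ≠ 0
    · rw [if_pos h2, if_pos ⟨by omega, h2⟩]
    · rw [if_neg h2, if_neg (fun hc => h2 hc.2)]

lemma icand_succ (b : List Int) (m k : Nat) (hm : m < 81) (hk : k < 81) :
    icand b (m + 1) k =
      if b.getD m 0 ≠ 0 then
        (if k = m then PySem.Set.empty
         else if matchN m k then PySem.Set.diff (icand b m k) [b.getD m 0]
         else icand b m k)
      else
        (if k = m then
           PySem.Set.diff (icand b m k) (compressI b (findMatchingTile (m : Int)))
         else icand b m k) := by
  by_cases hv : b.getD m 0 ≠ 0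
  · rw [if_pos hv]
    by_cases hkm : k = m
    · subst hkm
      rw [if_pos rfl]
      unfold icand
      rw [if_neg (by omega), if_pos hv]
      rfl
    · rw [if_neg hkm, icand_alt, icand_alt]
      by_cases hdead : k < m ∧ b.getD k 0 ≠ 0
      · rw [if_pos hdead, if_pos (show k < m + 1 ∧ b.getD k 0 ≠ 0 from ⟨by omega, hdead.2⟩)]
        by_cases hmk : matchN m k
        · rw [if_pos hmk]; rfl
        · rw [if_neg hmk]
      · rw [if_neg hdead, if_neg (show ¬(k < m + 1 ∧ b.getD k 0 ≠ 0) from by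
          rintro ⟨hlt, hne⟩; exact hdead ⟨by omega, hne⟩)]
        by_cases hmk : matchN m k
        · rw [if_pos hmk, diff_filter]
          apply List.filter_congr
          intro v _
          rw [Bool.eq_iff_iff]
          simp [remB_succ, hkm, hmk]
          tauto
        · rw [if_neg hmk]
          apply List.filter_congr
          intro v _
          rw [Bool.eq_iff_iff]
          simp [remB_succ, hkm, hmk]
  · rw [if_neg hv]
    push_neg at hv
    have hvq : b[m]?.getD 0 = (0 : Int) := by rw [← List.getD_eq_getElem?_getD]; exact hv
    by_cases hkm : k = m
    · subst hkm
      rw [if_pos rfl, icand_alt, icand_alt]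
      rw [if_neg (show ¬(k < k + 1 ∧ b.getD k 0 ≠ 0) from by rintro ⟨_, hne⟩; exact hne hv)]
      rw [if_neg (show ¬(k < k ∧ b.getD k 0 ≠ 0) from by rintro ⟨hlt, _⟩; omega)]
      rw [diff_filter]
      apply List.filter_congr
      intro v _
      rw [Bool.eq_iff_iff]
      simp [remB_succ, hvq]
      try tauto
    · rw [if_neg hkm, icand_alt, icand_alt]
      have hrem : ∀ v, remB b (m + 1) k v = remB b m k v := by
        intro v
        rw [remB_succ]
        simp [hkm, hvq]
      by_cases hdead : k < m ∧ b.getD k 0 ≠ 0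
      · rw [if_pos hdead, if_pos (show k < m + 1 ∧ b.getD k 0 ≠ 0 from ⟨by omega, hdead.2⟩)]
      · rw [if_neg hdead, if_neg (show ¬(k < m + 1 ∧ b.getD k 0 ≠ 0) from by
          rintro ⟨hlt, hne⟩; exact hdead ⟨by omega, hne⟩)]
        apply List.filter_congr
        intro v _
        rw [hrem]

lemma outer_char (b : List Int) (hb : b.length ≤ 81) :
    ∀ m, m ≤ b.length →
      (((PySem.List.enumerate (b.take m) 0).foldl (stepA b) initC).length = 81 ∧
       ∀ (k : Nat), k < 81 →
         PySem.List.pyGetD ((PySem.List.enumerate (b.take m) 0).foldl (stepA b) initC) (k : Int) PySem.Set.empty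
           = icand b m k) := by
  intro m
  induction m with
  | zero =>
    intro _
    constructor
    · simpa using length_initC
    · intro k hk
      simp only [List.take_zero, PySem.List.enumerate_nil, List.foldl_nil]
      rw [initC_get k hk]
      unfold icand remB
      simp
  | succ m ih =>
    intro hm1
    have hmb : m < b.length := by omega
    have hm : m < 81 := by omega
    obtain ⟨ihl, ihg⟩ := ih (by omega)
    have htake : b.take (m+1) = b.take m ++ [b[m]] := by
      rw [List.take_succ, List.getElem?_eq_getElem hmb]
      rfl
    have hlentake : (b.take m).length = m := by
      rw [List.length_take]; omega
    have henum : PySem.List.enumerate (b.take (m+1)) 0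
        = PySem.List.enumerate (b.take m) 0 ++ [((m : Int), b[m])] := by
      rw [htake, PySem.List.enumerate_append]
      rw [hlentake]
      norm_num
    rw [henum]
    rw [List.foldl_append]
    set C := (PySem.List.enumerate (b.take m) 0).foldl (stepA b) initC with hC
    simp only [List.foldl_cons, List.foldl_nil]
    constructor
    · rw [length_stepA, ihl]
    · intro k hk
      have hbm : b[m] = b.getD m 0 := by rw [List.getD_eq_getElem _ _ hmb]
      rw [stepA_get b C ihl m hm (b[m]) k hk]
      rw [ihg k hk]
      have hbm : b[m] = b.getD m 0 := List.getD_eq_getElem b 0 hmb ▸ rfl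
      rw [hbm]
      exact (icand_succ b m k hm hk).symm

lemma gcm2_char (b : List Int) (hb : b.length ≤ 81) (k : Nat) (hk : k < 81) :
    PySem.List.pyGetD (gcm2 b) (k : Int) PySem.Set.empty
      = if b.getD k 0 ≠ 0 then ([] : PySem.Set Int)
        else baseCand.filter (fun v => !(remB b b.length k v)) := by
  have h := (outer_char b hb b.length (le_refl _)).2 k hk
  rw [List.take_of_length_le (le_refl _)] at h
  rw [gcm2_eq, h, icand_alt]
  by_cases h2 : b.getD k 0 ≠ 0
  · have hkb : k < b.length := by
      by_contra hknb
      exact h2 (List.getD_eq_default _ _ (by omega))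
    rw [if_pos ⟨hkb, h2⟩, if_pos h2]
  · rw [if_neg (fun hc => h2 hc.2), if_neg h2]

lemma foldl_stepA_length (b : List Int) :
    ∀ (l : List (Int × Int)) (c : List (PySem.Set Int)), (l.foldl (stepA b) c).length = c.length := by
  intro l
  induction l with
  | nil => intro c; rfl
  | cons x xs ih => intro c; rw [List.foldl_cons, ih, length_stepA]

lemma gcm2_length (b : List Int) : (gcm2 b).length = 81 := by
  rw [gcm2_eq, foldl_stepA_length, length_initC]

lemma mem_compress (b : List Int) (hb : b.length ≤ 81) (k : Nat) (hk : k < 81) (v : Int) :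
    v ∈ compressI b (findMatchingTile (k : Int)) ↔ ∃ j, j < b.length ∧ matchN k j = true ∧ b.getD j 0 = v := by
  have hmask : ∀ (j : Nat) (hj : j < 81),
      (findMatchingTile (k : Int))[j]'(by rw [length_findMatchingTile]; exact hj)
        = if matchN k j then (1 : Int) else 0 := by
    intro j hj
    unfold findMatchingTile
    rw [List.getElem_map, PySem.List.getElem_pyRange_one]
    norm_num
    rw [matchB_natCast]
  have hbj : ∀ (j : Nat) (hj : j < b.length), b[j]'(by omega) = b.getD j 0 := by
    intro j hj
    rw [List.getD_eq_getElem _ _ (by omega)]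
  have hlz : (b.zip (findMatchingTile (k : Int))).length = b.length := by
    rw [List.length_zip, length_findMatchingTile]
    omega
  unfold compressI
  simp only [List.mem_map, List.mem_filter]
  constructor
  · rintro ⟨⟨x1, x2⟩, ⟨hmem, hne⟩, rfl⟩
    obtain ⟨j, hj, hget⟩ := List.mem_iff_getElem.1 hmem
    have hjb : j < b.length := by omega
    have hj81 : j < 81 := by omega
    rw [List.getElem_zip, Prod.mk.injEq] at hget
    obtain ⟨h1, h2⟩ := hget
    refine ⟨j, hjb, ?_, by rw [← h1, hbj j hjb]⟩
    by_contra hmk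
    rw [← h2, hmask j hj81, if_neg hmk] at hne
    simp at hne
  · rintro ⟨j, hj, hmk, hbv⟩
    have hj81 : j < 81 := by omega
    refine ⟨(b[j]'(by omega), (findMatchingTile (k : Int))[j]'(by rw [length_findMatchingTile]; omega)),
      ⟨?_, ?_⟩, by rw [hbj j hj]; exact hbv⟩
    · exact List.mem_iff_getElem.2 ⟨j, by omega, by rw [List.getElem_zip]⟩
    · rw [hmask j hj81, if_pos hmk]
      norm_num

lemma mem_used (b : List Int) (hb : b.length ≤ 81) (k : Nat) (hk : k < 81) (v : Int) :
    (PySem.Set.contains (PySem.Set.ofList (((peersB (k : Int)).filter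
        (fun p => decide (p < PySem.List.len b))).map (fun p => PySem.List.pyGetD b p 0))) v = true)
      ↔ ∃ j, j < b.length ∧ matchN k j = true ∧ b.getD j 0 = v := by
  rw [PySem.Set.contains_iff, PySem.Set.mem_ofList, peersB_natCast]
  simp only [List.mem_map, List.mem_filter, Int.ofNat_eq_natCast, PySem.List.len_eq,
    decide_eq_true_eq]
  constructor
  · rintro ⟨p, ⟨⟨q, hq, rfl⟩, hlt⟩, hval⟩
    have hq81 : q < 81 := peers_lt k hk q hq
    have hqb : q < b.length := by exact_mod_cast hlt
    rw [PySem.List.pyGetD_natCast] at hval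
    exact ⟨q, hqb, (mem_peersN_iff k q hk hq81).1 hq, hval⟩
  · rintro ⟨j, hj, hmk, hbv⟩
    have hj81 : j < 81 := by omega
    exact ⟨(j : Int), ⟨⟨j, (mem_peersN_iff k j hk hj81).2 hmk, rfl⟩,
      by exact_mod_cast hj⟩, by rw [PySem.List.pyGetD_natCast]; exact hbv⟩

lemma cand_eq (b : List Int) (hb : b.length ≤ 81) (k : Nat) (hk : k < 81) (h0 : b.getD k 0 = 0) :
    baseCand.filter (fun v => !(remB b b.length k v))
      = baseCand.filter (fun v =>
          !(PySem.Set.contains (PySem.Set.ofList (((peersB (k : Int)).filter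
              (fun p => decide (p < PySem.List.len b))).map (fun p => PySem.List.pyGetD b p 0))) v)) := by
  apply List.filter_congr
  intro v hv
  have hv0 : v ≠ 0 := by
    have hmem : v ∈ PySem.List.pyRange 1 10 1 := hv
    have := PySem.List.mem_pyRange_one.1 hmem
    omega
  suffices h : (remB b b.length k v = true) ↔
      (PySem.Set.contains (PySem.Set.ofList (((peersB (k : Int)).filter
          (fun p => decide (p < PySem.List.len b))).map (fun p => PySem.List.pyGetD b p 0))) v = true) by
    rw [Bool.eq_iff_iff.2 h]
  rw [mem_used b hb k hk v]
  unfold remB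
  simp only [Bool.or_eq_true, List.any_eq_true, Bool.and_eq_true, decide_eq_true_eq,
    bne_iff_ne, ne_eq, beq_iff_eq, List.mem_range]
  constructor
  · rintro (⟨j, hj, ⟨⟨hne, hmk⟩, hkj⟩, hbv⟩ | ⟨⟨hkn, hb0⟩, hmem⟩)
    · exact ⟨j, hj, by rw [matchN_symm]; exact hmk, hbv⟩
    · exact (mem_compress b hb k hk v).1 (List.elem_iff.1 hmem)
  · rintro ⟨j, hj, hmk, hbv⟩
    left
    refine ⟨j, hj, ⟨⟨?_, by rw [matchN_symm]; exact hmk⟩, ?_⟩, hbv⟩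
    · rw [hbv]; exact hv0
    · rintro rfl
      rw [List.getD_eq_getElem?_getD] at h0 hbv
      exact hv0 (by rw [← hbv, h0])

lemma set_len_one (L : PySem.Set Int) : (PySem.Set.len L == (1 : Int)) = (L.length == 1) := by
  have h1 : PySem.Set.len L = (L.length : Int) := by
    simp [PySem.Set.len, PySem.List.len_eq]
  rw [h1]
  by_cases h : L.length = 1 <;> simp [h]

lemma passB_length (b : List Int) : (passB b).length = b.length := by
  simp [passB, PySem.List.length_pyRange_one]

lemma pass_eq (b : List Int) (hb : b.length ≤ 81) :
    (PySem.List.enumerate (gcm2 b) 0).foldl (fun bb iv =>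
      if PySem.Set.len iv.2 == 1 then PySem.List.pySetD bb iv.1 (iv.2.headD 0) else bb) b
    = passB b := by
  have hlenG : (gcm2 b).length = 81 := gcm2_length b
  have hlenL : ((PySem.List.enumerate (gcm2 b) 0).foldl (fun bb iv =>
      if PySem.Set.len iv.2 == 1 then PySem.List.pySetD bb iv.1 (iv.2.headD 0) else bb) b).length = b.length :=
    foldl_enum_setD_length (α := Int) (β := PySem.Set Int) 0
      (fun _ sv => PySem.Set.len sv == 1) (fun _ sv _ => sv.headD 0) (gcm2 b) 0 b
  apply List.ext_getElem
  · rw [hlenL, passB_length]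
  intro k hk1 hk2
  have hkb : k < b.length := by rw [hlenL] at hk1; exact hk1
  have hk : k < 81 := by omega
  have hgetL := foldl_enum_setD_get (α := Int) (β := PySem.Set Int) 0 ([] : PySem.Set Int)
    (fun _ sv => PySem.Set.len sv == 1) (fun _ sv _ => sv.headD 0) (gcm2 b) 0 b k (by omega)
  rw [show ((0 : Nat) : Int) = (0 : Int) from rfl] at hgetL
  beta_reduce at hgetL
  have hL : ∀ (h : _), ((PySem.List.enumerate (gcm2 b) 0).foldl (fun bb iv =>
      if PySem.Set.len iv.2 == 1 then PySem.List.pySetD bb iv.1 (iv.2.headD 0) else bb) b)[k]'h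
      = PySem.List.pyGetD ((PySem.List.enumerate (gcm2 b) 0).foldl (fun bb iv =>
      if PySem.Set.len iv.2 == 1 then PySem.List.pySetD bb iv.1 (iv.2.headD 0) else bb) b) (k : Int) 0 := by
    intro h
    rw [PySem.List.pyGetD_natCast, List.getD_eq_getElem _ _ (by omega)]
  rw [Nat.sub_zero, hlenG] at hgetL
  have hbk : PySem.List.pyGetD b (k : Int) 0 = b.getD k 0 := PySem.List.pyGetD_natCast b k 0
  rw [show (gcm2 b).getD k [] = PySem.List.pyGetD (gcm2 b) (k : Int) PySem.Set.empty from by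
        rw [PySem.List.pyGetD_natCast]; rfl,
      gcm2_char b hb k hk] at hgetL
  rw [hL, hgetL]
  have hR : (passB b)[k]'hk2 = PySem.List.pyGetD (passB b) (k : Int) 0 := by
    rw [PySem.List.pyGetD_natCast, List.getD_eq_getElem _ _ (by rw [passB_length]; omega)]
  rw [hR]
  unfold passB
  rw [PySem.List.pyGetD_map_pyRange_of_nonneg _ (PySem.List.len b) (k : Int) 0 (by positivity)
        (by rw [PySem.List.len_eq]; exact_mod_cast hkb)]
  by_cases h0 : b.getD k 0 ≠ 0
  · rw [if_pos h0]
    rw [if_neg (show ¬(0 ≤ k ∧ k < 81 ∧ ((PySem.Set.len ([] : PySem.Set Int) == (1 : Int)) = true)) from by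
          rintro ⟨-, -, hq⟩; simp [PySem.Set.len] at hq)]
    rw [if_pos (show (PySem.List.pyGetD b (k : Int) 0 != 0) = true from by rw [hbk]; simpa using h0)]
  · push_neg at h0
    rw [if_neg (show ¬(b.getD k 0 ≠ 0) from fun hc => hc h0)]
    rw [if_neg (show ¬((PySem.List.pyGetD b (k : Int) 0 != 0) = true) from by rw [hbk, h0]; simp)]
    show (if 0 ≤ k ∧ k < 81 ∧ ((PySem.Set.len (baseCand.filter (fun v => !(remB b b.length k v))) == (1 : Int)) = true)
          then (baseCand.filter (fun v => !(remB b b.length k v))).headD 0 else PySem.List.pyGetD b (k : Int) 0)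
        = forcedB b (k : Int)
    unfold forcedB
    show _ = (if (((baseCand.filter (fun v =>
              !(PySem.Set.contains (PySem.Set.ofList (((peersB (k : Int)).filter
                  (fun p => decide (p < PySem.List.len b))).map (fun p => PySem.List.pyGetD b p 0))) v))).length == 1) = true)
           then PySem.List.pyGetD (baseCand.filter (fun v =>
              !(PySem.Set.contains (PySem.Set.ofList (((peersB (k : Int)).filter
                  (fun p => decide (p < PySem.List.len b))).map (fun p => PySem.List.pyGetD b p 0))) v))) 0 0
           else 0)
    rw [← cand_eq b hb k hk h0]
    by_cases hlen1 : (baseCand.filter (fun v => !(remB b b.length k v))).length = 1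
    · rw [if_pos ⟨Nat.zero_le k, hk, by rw [set_len_one]; simp [hlen1]⟩, if_pos (by simp [hlen1])]
      obtain ⟨x, hx⟩ := List.length_eq_one_iff.1 hlen1
      rw [hx]
      simp [PySem.List.pyGetD_zero_cons]
    · rw [if_neg (by rintro ⟨-, -, hq⟩; rw [set_len_one] at hq; simp [hlen1] at hq),
          if_neg (by simpa using hlen1), hbk, h0]

-- ===== B-side lemmas: the 27-set pass equals the row-col-box pass =====

def bfold (b : List Int) (m : Nat) :
    List (PySem.Set Int) × List (PySem.Set Int) × List (PySem.Set Int) :=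
  (PySem.List.pyRange 0 (m : Int) 1).foldl (buildStep b)
    ((PySem.List.pyRange 0 9 1).map (fun _ => PySem.Set.empty),
     (PySem.List.pyRange 0 9 1).map (fun _ => PySem.Set.empty),
     (PySem.List.pyRange 0 9 1).map (fun _ => PySem.Set.empty))

lemma bxI_natCast (k : Nat) : bxI (k : Int) = ((k / 9 / 3 * 3 + k % 9 / 3 : Nat) : Int) := by
  simp [bxI]

lemma setadd_mem (L : List (PySem.Set Int)) (hL : L.length = 9) (t : Nat) (ht : t < 9)
    (v0 : Int) (r : Nat) (hr : r < 9) (v : Int) :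
    (v ∈ PySem.List.pyGetD (PySem.List.pySetD L (t : Int)
        (PySem.Set.add (PySem.List.pyGetD L (t : Int) PySem.Set.empty) v0)) (r : Int) PySem.Set.empty)
      ↔ (v ∈ PySem.List.pyGetD L (r : Int) PySem.Set.empty ∨ (r = t ∧ v = v0)) := by
  rw [PySem.List.pyGetD_pySetD_natCast _ _ _ _ _ (by rw [hL]; exact ht)]
  by_cases h : r = t
  · subst h
    simp [PySem.Set.mem_add]
  · simp [h]

lemma exists_succ_split (m : Nat) (Q : Nat → Prop) :
    (∃ j, j < m + 1 ∧ Q j) ↔ (∃ j, j < m ∧ Q j) ∨ Q m := by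
  constructor
  · rintro ⟨j, hj, hq⟩
    by_cases h : j = m
    · subst h; exact Or.inr hq
    · exact Or.inl ⟨j, by omega, hq⟩
  · rintro (⟨j, hj, hq⟩ | hq)
    · exact ⟨j, by omega, hq⟩
    · exact ⟨m, by omega, hq⟩

lemma bfold_char (b : List Int) (hb : b.length ≤ 81) :
    ∀ m, m ≤ b.length →
      ((bfold b m).1.length = 9 ∧ (bfold b m).2.1.length = 9 ∧ (bfold b m).2.2.length = 9) ∧
      (∀ (r : Nat), r < 9 → ∀ v : Int,
        (v ∈ PySem.List.pyGetD (bfold b m).1 (r : Int) PySem.Set.empty ↔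
          ∃ j, j < m ∧ j / 9 = r ∧ b.getD j 0 = v ∧ v ≠ 0)) ∧
      (∀ (c : Nat), c < 9 → ∀ v : Int,
        (v ∈ PySem.List.pyGetD (bfold b m).2.1 (c : Int) PySem.Set.empty ↔
          ∃ j, j < m ∧ j % 9 = c ∧ b.getD j 0 = v ∧ v ≠ 0)) ∧
      (∀ (x : Nat), x < 9 → ∀ v : Int,
        (v ∈ PySem.List.pyGetD (bfold b m).2.2 (x : Int) PySem.Set.empty ↔
          ∃ j, j < m ∧ j / 9 / 3 * 3 + j % 9 / 3 = x ∧ b.getD j 0 = v ∧ v ≠ 0)) := by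
  intro m
  induction m with
  | zero =>
    intro _
    have hnil : PySem.List.pyRange 0 ((0 : Nat) : Int) 1 = [] :=
      PySem.List.pyRange_one_eq_nil (by norm_num)
    constructor
    · refine ⟨?_, ?_, ?_⟩ <;>
        simp [bfold, hnil, PySem.List.length_pyRange_one]
    refine ⟨?_, ?_, ?_⟩ <;>
    · intro r hr v
      simp only [bfold, hnil, List.foldl_nil]
      rw [PySem.List.pyGetD_map_pyRange_of_nonneg _ 9 (r : Int) _ (by positivity)
            (by exact_mod_cast hr)]
      simp [PySem.Set.empty]
  | succ m ih =>
    intro hm1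
    have hmb : m < b.length := by omega
    have hm81 : m < 81 := by omega
    obtain ⟨⟨hl1, hl2, hl3⟩, hrow, hcol, hbox⟩ := ih (by omega)
    have hstep : bfold b (m + 1) = buildStep b (bfold b m) (m : Int) := by
      unfold bfold
      rw [show (((m + 1 : Nat)) : Int) = (m : Int) + 1 by push_cast; ring,
          PySem.List.pyRange_one_succ_right (by positivity), List.foldl_append]
      rfl
    have hv0 : PySem.List.pyGetD b (m : Int) 0 = b.getD m 0 := PySem.List.pyGetD_natCast b m 0
    by_cases hz : b.getD m 0 = 0
    · have hsame : bfold b (m + 1) = bfold b m := by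
        rw [hstep]
        unfold buildStep
        rw [hv0, hz]
        simp
      rw [hsame]
      refine ⟨⟨hl1, hl2, hl3⟩, ?_, ?_, ?_⟩ <;>
        · intro r hr v
          first
            | rw [hrow r hr v] | rw [hcol r hr v] | rw [hbox r hr v]
          rw [exists_succ_split]
          constructor
          · exact Or.inl
          · rintro (h | ⟨-, hbv, hne⟩)
            · exact h
            · exact absurd (hbv.symm.trans hz) hne
    · have hne : (PySem.List.pyGetD b (m : Int) 0 != 0) = true := by rw [hv0]; simpa using hz
      have hd9 : PySem.Int.floordiv ((m : Nat) : Int) 9 = ((m / 9 : Nat) : Int) := by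
        exact_mod_cast PySem.Int.floordiv_natCast m 9
      have hm9 : PySem.Int.mod ((m : Nat) : Int) 9 = ((m % 9 : Nat) : Int) := by
        exact_mod_cast PySem.Int.mod_natCast m 9
      have hstep2 : bfold b (m + 1) =
          (PySem.List.pySetD (bfold b m).1 ((m / 9 : Nat) : Int)
            (PySem.Set.add (PySem.List.pyGetD (bfold b m).1 ((m / 9 : Nat) : Int) PySem.Set.empty) (b.getD m 0)),
           PySem.List.pySetD (bfold b m).2.1 ((m % 9 : Nat) : Int)
            (PySem.Set.add (PySem.List.pyGetD (bfold b m).2.1 ((m % 9 : Nat) : Int) PySem.Set.empty) (b.getD m 0)),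
           PySem.List.pySetD (bfold b m).2.2 ((m / 9 / 3 * 3 + m % 9 / 3 : Nat) : Int)
            (PySem.Set.add (PySem.List.pyGetD (bfold b m).2.2 ((m / 9 / 3 * 3 + m % 9 / 3 : Nat) : Int) PySem.Set.empty) (b.getD m 0))) := by
        rw [hstep]
        unfold buildStep
        rw [if_pos hne, bxI_natCast m, hv0, hd9, hm9]
      rw [hstep2]
      refine ⟨⟨by simp [PySem.List.length_pySetD, hl1],
               by simp [PySem.List.length_pySetD, hl2],
               by simp [PySem.List.length_pySetD, hl3]⟩, ?_, ?_, ?_⟩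
      · intro r hr v
        rw [setadd_mem _ hl1 (m / 9) (by omega) _ r hr v, hrow r hr v, exists_succ_split]
        constructor
        · rintro (h | ⟨h1, h2⟩)
          · exact Or.inl h
          · exact Or.inr ⟨h1.symm, h2.symm, by rw [h2]; exact hz⟩
        · rintro (h | ⟨h1, h2, h3⟩)
          · exact Or.inl h
          · exact Or.inr ⟨h1.symm, h2.symm⟩
      · intro r hr v
        rw [setadd_mem _ hl2 (m % 9) (by omega) _ r hr v, hcol r hr v, exists_succ_split]
        constructor
        · rintro (h | ⟨h1, h2⟩)
          · exact Or.inl h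
          · exact Or.inr ⟨h1.symm, h2.symm, by rw [h2]; exact hz⟩
        · rintro (h | ⟨h1, h2, h3⟩)
          · exact Or.inl h
          · exact Or.inr ⟨h1.symm, h2.symm⟩
      · intro r hr v
        rw [setadd_mem _ hl3 (m / 9 / 3 * 3 + m % 9 / 3) (by omega) _ r hr v, hbox r hr v,
            exists_succ_split]
        constructor
        · rintro (h | ⟨h1, h2⟩)
          · exact Or.inl h
          · exact Or.inr ⟨h1.symm, h2.symm, by rw [h2]; exact hz⟩
        · rintro (h | ⟨h1, h2, h3⟩)
          · exact Or.inl h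
          · exact Or.inr ⟨h1.symm, h2.symm⟩

lemma passAlt_eq_passB (b : List Int) (hb : b.length ≤ 81) : passAlt b = passB b := by
  obtain ⟨⟨hl1, hl2, hl3⟩, hrow, hcol, hbox⟩ := bfold_char b hb b.length (le_refl _)
  unfold passAlt passB
  apply List.map_congr_left
  intro i hi
  obtain ⟨hi0, hin⟩ := PySem.List.mem_pyRange_one.1 hi
  rw [PySem.List.len_eq] at hin
  obtain ⟨k, rfl⟩ : ∃ k : Nat, i = (k : Int) := ⟨i.toNat, by omega⟩
  have hkn : k < b.length := by exact_mod_cast hin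
  have hk81 : k < 81 := by omega
  have hbk : PySem.List.pyGetD b (k : Int) 0 = b.getD k 0 := PySem.List.pyGetD_natCast b k 0
  by_cases h0 : b.getD k 0 ≠ 0
  · have : (PySem.List.pyGetD b (k : Int) 0 != 0) = true := by rw [hbk]; simpa using h0
    simp only [this, if_true]
  · push_neg at h0
    have hcond : (PySem.List.pyGetD b (k : Int) 0 != 0) = false := by rw [hbk, h0]; simp
    simp only [hcond, Bool.false_eq_true, if_false]
    have hsfold : (PySem.List.pyRange 0 (PySem.List.len b) 1).foldl (buildStep b)
        ((PySem.List.pyRange 0 9 1).map (fun _ => PySem.Set.empty),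
         (PySem.List.pyRange 0 9 1).map (fun _ => PySem.Set.empty),
         (PySem.List.pyRange 0 9 1).map (fun _ => PySem.Set.empty)) = bfold b b.length := by
      unfold bfold
      rw [PySem.List.len_eq]
    rw [hsfold]
    have hd9 : PySem.Int.floordiv ((k : Nat) : Int) 9 = ((k / 9 : Nat) : Int) := by
      exact_mod_cast PySem.Int.floordiv_natCast k 9
    have hm9 : PySem.Int.mod ((k : Nat) : Int) 9 = ((k % 9 : Nat) : Int) := by
      exact_mod_cast PySem.Int.mod_natCast k 9
    rw [hd9, hm9, bxI_natCast k]
    have hbase : PySem.Set.ofList (PySem.List.pyRange 1 10 1) = baseCand :=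
      PySem.Set.ofList_eq_self_of_nodup _ (PySem.List.nodup_pyRange_one 1 10)
    rw [hbase]
    set R := PySem.List.pyGetD (bfold b b.length).1 ((k / 9 : Nat) : Int) PySem.Set.empty with hR
    set C := PySem.List.pyGetD (bfold b b.length).2.1 ((k % 9 : Nat) : Int) PySem.Set.empty with hC
    set X := PySem.List.pyGetD (bfold b b.length).2.2
      ((k / 9 / 3 * 3 + k % 9 / 3 : Nat) : Int) PySem.Set.empty with hX
    set U := PySem.Set.ofList (((peersB (k : Int)).filter
      (fun p => decide (p < PySem.List.len b))).map (fun p => PySem.List.pyGetD b p 0)) with hU0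
    -- membership in the three unit sets agrees with membership in the peer multiset
    have hU : ∀ w : Int, w ≠ 0 →
        ((w ∈ R ∨ w ∈ C ∨ w ∈ X) ↔ PySem.Set.contains U w = true) := by
      intro w hw0
      rw [hU0, mem_used b hb k hk81 w, hR, hC, hX,
          hrow (k / 9) (by omega) w, hcol (k % 9) (by omega) w,
          hbox (k / 9 / 3 * 3 + k % 9 / 3) (by omega) w]
      constructor
      · rintro (⟨j, hj, he, hbv, -⟩ | ⟨j, hj, he, hbv, -⟩ | ⟨j, hj, he, hbv, -⟩) <;>
        · refine ⟨j, hj, ?_, hbv⟩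
          simp only [matchN, Bool.or_eq_true, Bool.and_eq_true, beq_iff_eq]
          omega
      · rintro ⟨j, hj, hmk, hbv⟩
        simp only [matchN, Bool.or_eq_true, Bool.and_eq_true, beq_iff_eq] at hmk
        rcases hmk with (h | h) | ⟨h1, h2⟩
        · exact Or.inr (Or.inl ⟨j, hj, by omega, hbv, hw0⟩)
        · exact Or.inl ⟨j, hj, by omega, hbv, hw0⟩
        · exact Or.inr (Or.inr ⟨j, hj, by omega, hbv, hw0⟩)
    have hkey : PySem.Set.diff (PySem.Set.diff (PySem.Set.diff baseCand R) C) X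
        = baseCand.filter (fun v => !(PySem.Set.contains U v)) := by
      rw [set_diff_eq_filter, set_diff_eq_filter, set_diff_eq_filter, List.filter_filter,
          List.filter_filter]
      apply List.filter_congr
      intro v hv
      have hv19 : (1 : Int) ≤ v ∧ v < 10 := PySem.List.mem_pyRange_one.1 hv
      have hv0 : v ≠ 0 := by omega
      by_cases hm : (v ∈ R ∨ v ∈ C ∨ v ∈ X)
      · rw [(hU v hv0).1 hm]
        rcases hm with h | h | h
        · rw [(PySem.Set.contains_iff _ _).2 h]
          simp
        · rw [(PySem.Set.contains_iff _ _).2 h]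
          simp
        · rw [(PySem.Set.contains_iff _ _).2 h]
          simp
      · have hcf : PySem.Set.contains U v = false := by
          cases hcu : PySem.Set.contains U v
          · rfl
          · exact absurd ((hU v hv0).2 hcu) hm
        have c1 : PySem.Set.contains R v = false := by
          cases hc : PySem.Set.contains R v
          · rfl
          · exact absurd (Or.inl ((PySem.Set.contains_iff _ _).1 hc)) hm
        have c2 : PySem.Set.contains C v = false := by
          cases hc : PySem.Set.contains C v
          · rfl
          · exact absurd (Or.inr (Or.inl ((PySem.Set.contains_iff _ _).1 hc))) hm
        have c3 : PySem.Set.contains X v = false := by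
          cases hc : PySem.Set.contains X v
          · rfl
          · exact absurd (Or.inr (Or.inr ((PySem.Set.contains_iff _ _).1 hc))) hm
        rw [hcf, c1, c2, c3]
        rfl
    rw [hkey]
    unfold forcedB
    show (if (PySem.Set.len (baseCand.filter (fun v => !(PySem.Set.contains U v))) == 1) = true
          then (baseCand.filter (fun v => !(PySem.Set.contains U v))).headD 0 else 0)
        = (if ((baseCand.filter (fun v => !(PySem.Set.contains U v))).length == 1) = true
           then PySem.List.pyGetD (baseCand.filter (fun v => !(PySem.Set.contains U v))) 0 0
           else 0)
    rw [set_len_one]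
    set cand := baseCand.filter (fun v => !(PySem.Set.contains U v)) with hcand
    by_cases hlen1 : cand.length = 1
    · rw [if_pos (by simp [hlen1]), if_pos (by simp [hlen1])]
      obtain ⟨x, hx⟩ := List.length_eq_one_iff.1 hlen1
      rw [hx]
      simp [PySem.List.pyGetD_zero_cons]
    · rw [if_neg (by simpa using hlen1), if_neg (by simpa using hlen1)]

-- pointwise form of passB and the zero-count argument for the loop bound

lemma passB_getElem (b : List Int) (k : Nat) (hk : k < b.length) :
    (passB b)[k]'(by rw [passB_length]; exact hk)
      = if b[k]'hk ≠ 0 then b[k]'hk else forcedB b (k : Int) := by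
  unfold passB
  rw [List.getElem_map, PySem.List.getElem_pyRange_one]
  have hidx : ((0 : Int) + (k : Int)) = (k : Int) := by ring
  rw [hidx, PySem.List.pyGetD_natCast, List.getD_eq_getElem _ _ hk]
  by_cases h : b[k]'hk ≠ 0
  · rw [if_pos (by simpa using h), if_pos h]
  · rw [if_neg (by simpa using h), if_neg h]

lemma countP_zero_le : ∀ (p q : List Int), q.length = p.length →
    (∀ (k : Nat) (h1 : k < p.length) (h2 : k < q.length), p[k]'h1 ≠ 0 → q[k]'h2 = p[k]'h1) →
    q.countP (fun x => x == 0) ≤ p.countP (fun x => x == 0) := by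
  intro p
  induction p with
  | nil =>
    intro q hl _
    rw [List.eq_nil_of_length_eq_zero hl]
  | cons x p' ih =>
    intro q hl H
    cases q with
    | nil => simp at hl
    | cons y q' =>
      have hl' : q'.length = p'.length := by simpa using hl
      have H' : ∀ (k : Nat) (h1 : k < p'.length) (h2 : k < q'.length), p'[k]'h1 ≠ 0 → q'[k]'h2 = p'[k]'h1 := by
        intro k h1 h2 hne
        exact H (k + 1) (by simpa using h1) (by simpa using h2) hne
      have hle := ih q' hl' H'
      rw [List.countP_cons, List.countP_cons]
      by_cases hx : x = 0
      · have hx' : ((x : Int) == 0) = true := by simp [hx]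
        cases hyb : ((y : Int) == 0) <;> simp [hx', hyb] <;> omega
      · have hyx : y = x := H 0 (by simp) (by simp) hx
        rw [hyx]
        cases hxb : ((x : Int) == 0) <;> simp [hxb] <;> omega

lemma countP_zero_lt : ∀ (p q : List Int), q.length = p.length →
    (∀ (k : Nat) (h1 : k < p.length) (h2 : k < q.length), p[k]'h1 ≠ 0 → q[k]'h2 = p[k]'h1) →
    q ≠ p →
    q.countP (fun x => x == 0) < p.countP (fun x => x == 0) := by
  intro p
  induction p with
  | nil =>
    intro q hl _ hne
    exact absurd (List.eq_nil_of_length_eq_zero hl) hne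
  | cons x p' ih =>
    intro q hl H hne
    cases q with
    | nil => simp at hl
    | cons y q' =>
      have hl' : q'.length = p'.length := by simpa using hl
      have H' : ∀ (k : Nat) (h1 : k < p'.length) (h2 : k < q'.length), p'[k]'h1 ≠ 0 → q'[k]'h2 = p'[k]'h1 := by
        intro k h1 h2 hne'
        exact H (k + 1) (by simpa using h1) (by simpa using h2) hne'
      rw [List.countP_cons, List.countP_cons]
      by_cases hxy : y = x
      · subst hxy
        have hne' : q' ≠ p' := by
          intro hc; exact hne (by rw [hc])
        have := ih q' hl' H' hne'
        cases hxb : ((y : Int) == 0) <;> simp [hxb] <;> omega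
      · have hx0 : x = 0 := by
          by_contra hx
          exact hxy (H 0 (by simp) (by simp) hx)
        have hy0 : ((y : Int) == 0) = false := by
          subst hx0
          simpa using hxy
        have hle := countP_zero_le p' q' hl' H'
        simp only [hx0, hy0, beq_self_eq_true, if_true, Bool.false_eq_true, if_false]
        omega

lemma passB_point (b : List Int) (k : Nat) (h1 : k < b.length)
    (h2 : k < (passB b).length) (hne : b[k]'h1 ≠ 0) : (passB b)[k]'h2 = b[k]'h1 := by
  rw [passB_getElem b k h1, if_pos hne]

lemma iter_stable {α : Type} (f : α → α) (b : α) (h : f b = b) : ∀ m, f^[m] b = b := by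
  intro m
  induction m with
  | zero => rfl
  | succ n ih => rw [Function.iterate_succ_apply, h, ih]

lemma foldl_const_iterate {α β : Type} (f : α → α) :
    ∀ (l : List β) (b : α), l.foldl (fun acc _ => f acc) b = f^[l.length] b := by
  intro l
  induction l with
  | nil => intro b; rfl
  | cons x xs ih =>
    intro b
    rw [List.foldl_cons, ih, List.length_cons, Function.iterate_succ_apply]

lemma loop_main : ∀ (fuel : Nat) (b : List Int) (m : Nat), b.length ≤ 81 →
    b.countP (fun x => x == 0) < fuel → b.countP (fun x => x == 0) < m →
    narrowLoop fuel b = passB^[m] b := by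
  intro fuel
  induction fuel with
  | zero => intro b m _ h _; omega
  | succ f ih =>
    intro b m hb hf hm
    show (let candidates := gcm2 b
          let b' := (PySem.List.enumerate candidates 0).foldl (fun bb iv =>
            if PySem.Set.len iv.2 == 1 then PySem.List.pySetD bb iv.1 (iv.2.headD 0) else bb) b
          if b == b' then b' else narrowLoop f b') = passB^[m] b
    simp only [pass_eq b hb]
    by_cases hfix : passB b = b
    · rw [if_pos (by rw [hfix]; exact beq_self_eq_true b), hfix, iter_stable passB b hfix m]
    · rw [if_neg (by simp only [beq_iff_eq]; exact fun hc => hfix hc.symm)]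
      have hlt : (passB b).countP (fun x => x == 0) < b.countP (fun x => x == 0) :=
        countP_zero_lt b (passB b) (passB_length b)
          (fun k h1 h2 hne => passB_point b k h1 h2 hne) hfix
      cases m with
      | zero => omega
      | succ m' =>
        rw [Function.iterate_succ_apply]
        exact ih (passB b) m' (by rw [passB_length]; exact hb) (by omega) (by omega)

lemma iterate_eq : ∀ (m : Nat) (b : List Int), b.length ≤ 81 → passAlt^[m] b = passB^[m] b := by
  intro m
  induction m with
  | zero => intro b _; rfl
  | succ n ih =>
    intro b hb
    rw [Function.iterate_succ_apply, Function.iterate_succ_apply, passAlt_eq_passB b hb,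
        ih (passB b) (by rw [passB_length]; exact hb)]

lemma narrow_alt_eq_iter (board : List Int) :
    narrow_alt board = passAlt^[board.length + 1] board := by
  unfold narrow_alt
  rw [foldl_const_iterate]
  congr 1
  rw [PySem.List.length_pyRange_one, PySem.List.len_eq]
  omega

-- ===== VERDICT (by name: the statement is the Claim_ definition above) =====
theorem narrow_spec : Claim_equal_narrow := by
  intro board _ hpre
  unfold Spec_narrow
  have hb : board.length ≤ 81 := hpre.1
  have hzc : board.countP (fun x => x == 0) ≤ board.length := List.countP_le_length
  rw [narrow_alt_eq_iter board, iterate_eq (board.length + 1) board hb]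
  show narrowLoop 82 board = _
  exact loop_main 82 board (board.length + 1) hb (by omega) (by omega)
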